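-- pv_equiv track=rewrite | github.com/Rajat4445/DataCamp | Practicing Coding Interview Questions in Python/Chapter 2.py | character_position
-- ===== SOURCE A (Python) =====
-- def character_position(string):
--     output = dict()
--
--     for index, character in enumerate(string):
--         if character in output:
--             output[character].append(index)
--         else:
--             output[character] = [index]
--
--     return output
-- ===== SOURCE B (Python) =====
-- def character_position(string):
--     # Per-character index collection: one comprehension over the distinct
--     # characters (first-occurrence order), each scanning the string once.
--     return {c: [i for i, ch in enumerate(string) if ch == c]
--             for c in dict.fromkeys(string)}
-- ===== Notes on version B (the rewrite author's own statement) =====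
-- stated objective: idiomatic
-- what changed: Replaces the single-pass group-by with a running dict of lists by a dict comprehension over the distinct characters (dict.fromkeys for deterministic first-occurrence order), each rescanning the string for its indices.
import Mathlib
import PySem

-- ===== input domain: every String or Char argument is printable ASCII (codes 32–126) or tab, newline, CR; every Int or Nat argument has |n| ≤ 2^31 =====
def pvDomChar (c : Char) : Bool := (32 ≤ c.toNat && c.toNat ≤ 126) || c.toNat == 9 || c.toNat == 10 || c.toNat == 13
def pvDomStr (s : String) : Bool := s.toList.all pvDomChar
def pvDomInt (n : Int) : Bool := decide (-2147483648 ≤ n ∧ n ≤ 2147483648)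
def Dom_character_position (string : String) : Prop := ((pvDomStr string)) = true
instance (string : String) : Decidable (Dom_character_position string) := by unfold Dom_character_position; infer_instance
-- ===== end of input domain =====

-- B builds the result with a dict comprehension over the distinct characters instead of A's running dict of lists.

-- ===== PORT A =====
-- single pass: a dict of lists, appending each index to its character's list
def character_position (string : String) : List (String × List Int) :=
  let output : PySem.Dict Char (List Int) :=
    (PySem.List.enumerate string.toList 0).foldl
      (fun d p =>
        if d.contains p.2 then d.modify p.2 [] (· ++ [p.1])
        else d.insert p.2 [p.1])
      PySem.Dict.empty
  -- Python dict keys are 1-char strings; render the Char keys as such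
  output.items.map (fun p => (p.1.toString, p.2))

-- ===== PORT B =====
-- dict comprehension: for each distinct character (first-occurrence order), collect its indices
def character_position_alt (string : String) : List (String × List Int) :=
  (PySem.List.dedup string.toList).map
    (fun c => (c.toString,
      (PySem.List.enumerate string.toList 0).filterMap
        (fun p => if p.2 == c then some p.1 else none)))

-- ===== PRECONDITION & SPEC =====
def Spec_character_position (string : String) (out : List (String × List Int)) : Prop := out = character_position_alt string
instance (string : String) (out : List (String × List Int)) : Decidable (Spec_character_position string out) := by unfold Spec_character_position; infer_instance

-- ===== CLAIM (what is proved, stated in full; the proofs are below) =====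
def Claim_equal_character_position : Prop := ∀ (string : String), Dom_character_position string → Spec_character_position string (character_position string)

-- ===== LEMMAS AND PROOFS =====

-- A's branch is exactly Python's d[k] = d.get(k, []) + [i] in both cases
theorem pv_step_eq (d : PySem.Dict Char (List Int)) (p : Int × Char) :
    (if d.contains p.2 then d.modify p.2 [] (· ++ [p.1]) else d.insert p.2 [p.1])
      = d.modify p.2 [] (· ++ [p.1]) := by
  by_cases h : d.contains p.2 = true
  · simp [h]
  · have hc : d.contains p.2 = false := by simpa using h
    simp [PySem.Dict.modify, PySem.Dict.getD_of_not_contains, hc]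

theorem pv_filterMap_eq (ps : List (Int × Char)) (c : Char) :
    ps.filterMap (fun p => if p.2 == c then some p.1 else none)
      = ((ps.map Prod.swap).filter (fun p => p.1 == c)).map (·.2) := by
  induction ps with
  | nil => simp
  | cons q qs ih =>
    simp only [beq_iff_eq] at ih ⊢
    by_cases h : q.2 = c <;>
      simp [h, ih, Prod.swap]

-- ===== VERDICT (by name: the statement is the Claim_ definition above) =====
theorem character_position_spec : Claim_equal_character_position := by
  intro s _
  show character_position s = character_position_alt s
  unfold character_position character_position_alt
  have hstep :
      (PySem.List.enumerate s.toList 0).foldl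
        (fun d p =>
          if PySem.Dict.contains d p.2 then d.modify p.2 [] (· ++ [p.1])
          else d.insert p.2 [p.1])
        PySem.Dict.empty
      = ((PySem.List.enumerate s.toList 0).map Prod.swap).foldl
          (fun d p => d.modify p.1 [] (· ++ [p.2])) PySem.Dict.empty := by
    rw [List.foldl_map]
    congr 1
    funext d p
    rw [pv_step_eq]
    rfl
  set ps := (PySem.List.enumerate s.toList 0).map Prod.swap with hps
  have hnodup :
      ((ps.foldl (fun d p => d.modify p.1 [] (· ++ [p.2])) PySem.Dict.empty).keys).Nodup := by
    have := PySem.Dict.nodup_keys_foldl_modify_key (l := ps) (key := Prod.fst)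
      (d0 := ([] : List Int)) (f := fun _ p => (· ++ [p.2]))
      (d := PySem.Dict.empty) (by simp)
    simpa using this
  have hitems := PySem.Dict.items_eq_map_keys
    (ps.foldl (fun d p => d.modify p.1 [] (· ++ [p.2])) PySem.Dict.empty) hnodup ([] : List Int)
  show (List.map (fun p => (p.1.toString, p.2))
      ((PySem.List.enumerate s.toList 0).foldl
        (fun d p =>
          if d.contains p.2 then d.modify p.2 [] (· ++ [p.1])
          else d.insert p.2 [p.1]) PySem.Dict.empty).items) = _
  rw [hstep, hitems]
  have hkeys :
      (ps.foldl (fun d p => d.modify p.1 [] (· ++ [p.2])) PySem.Dict.empty).keys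
        = PySem.List.dedup s.toList := by
    have := PySem.Dict.keys_foldl_modify_key (l := ps) (key := Prod.fst)
      (d0 := ([] : List Int)) (f := fun _ p => (· ++ [p.2])) (d := PySem.Dict.empty)
    rw [this]
    have hmap : ps.map Prod.fst = s.toList := by
      rw [hps, List.map_map]
      have hc : (Prod.fst ∘ Prod.swap : Int × Char → Char) = fun p => p.2 := rfl
      rw [hc]
      exact PySem.List.map_snd_enumerate s.toList 0
    simp [hmap, PySem.Set.update, PySem.Set.ofList_eq_foldl, PySem.Dict.keys_empty,
      PySem.List.dedup_eq_ofList]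
  rw [hkeys, List.map_map]
  refine List.map_congr_left (fun c _ => ?_)
  simp only [Function.comp]
  rw [PySem.Dict.getD_foldl_modify_append, pv_filterMap_eq]
  simp [hps]
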